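-- pv_equiv track=rewrite | github.com/gencau/boatse-query-reformulation | bug_localization/src/baselines/backbones/agent/utils/snippet_selector.py | _windows
-- ===== SOURCE A (Python) =====
-- from typing import List, Tuple
--
-- def _windows(lines: List[str], win: int = 40, stride: int = 20) -> List[Tuple[int,int]]:
--     out = []
--     n = len(lines)
--     i = 0
--     while i < n:
--         j = min(n, i + win)
--         # avoid ultra-empty windows
--         if any(t.strip() for t in lines[i:j]):
--             out.append((i, j))
--         if j == n: break
--         i += stride
--     return out
-- ===== SOURCE B (Python) =====
-- from typing import List, Tuple
--
-- def _windows(lines: List[str], win: int = 40, stride: int = 20) -> List[Tuple[int, int]]: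
--     n = len(lines)
--     # positions of the lines that actually carry text, in increasing order
--     nonblank = [k for k, t in enumerate(lines) if t.strip()]
--     out = []
--     p = 0  # first position in nonblank not yet left behind by the window start
--     i = 0
--     while i < n:
--         j = min(n, i + win)
--         while p < len(nonblank) and nonblank[p] < i:
--             p += 1
--         if p < len(nonblank) and nonblank[p] < j:
--             out.append((i, j))
--         if j == n:
--             break
--         i += stride
--     return out
-- ===== Notes on version B (the rewrite author's own statement) =====
-- stated objective: alternative
-- what changed: B builds the sorted list of non-blank line indices once and sweeps it with a monotone pointer, so each window's emptiness test is an O(1) pointer comparison instead of A's any()-scan over the window slice.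
-- intended difference: When win < 0 and some visited window start i has i+win < 0 with a non-blank line in lines[i:n+i+win], A's negative slice end wraps around and A emits pairs with a negative end index such as (0, -1); B emits no window there, since a window of non-positive width is empty, which is the intended meaning of (start, end) pairs. — e.g. on _windows(["x", "y"], -1, 1): A returns [(0, -1)], B returns []
import Mathlib
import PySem

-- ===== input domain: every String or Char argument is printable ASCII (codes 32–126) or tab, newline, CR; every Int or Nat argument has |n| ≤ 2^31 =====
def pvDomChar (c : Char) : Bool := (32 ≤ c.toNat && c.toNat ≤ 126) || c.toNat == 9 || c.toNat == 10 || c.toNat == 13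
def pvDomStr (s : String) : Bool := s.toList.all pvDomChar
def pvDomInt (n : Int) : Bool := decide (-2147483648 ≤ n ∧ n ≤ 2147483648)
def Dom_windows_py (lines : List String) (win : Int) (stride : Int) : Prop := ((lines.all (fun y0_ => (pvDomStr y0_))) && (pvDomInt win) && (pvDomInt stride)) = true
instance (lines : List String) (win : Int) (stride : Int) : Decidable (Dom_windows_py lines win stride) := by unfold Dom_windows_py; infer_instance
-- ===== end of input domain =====

-- B precomputes the sorted list of non-blank line indices once and sweeps it with a
-- monotone pointer instead of A's per-window any()-scan of the slice (not measured faster)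
-- (objective: alternative). Where win < 0, A's negative slice end wraps around and A can
-- emit pairs with a negative end; B treats such windows as empty (see D_windows_py).


-- ===== PORT A =====
-- Python truthiness of t.strip(): the stripped string is non-empty (shared by both ports)
def pvNonBlank (t : String) : Bool := PySem.Str.strip t ≠ ""

-- the while-loop of A; fuel = lines.length + 1 bounds the iteration count on every
-- input where the Python loop terminates (guard for totality only)
def windowsLoopA (lines : List String) (win stride n : Int) :
    Nat → Int → List (Int × Int) → List (Int × Int)
  | 0, _, out => out
  | fuel + 1, i, out =>
    if i < n then
      let j := min n (i + win)
      let out' := if (PySem.List.slice lines (some i) (some j)).any pvNonBlank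
                  then out ++ [(i, j)] else out
      if j = n then out' else windowsLoopA lines win stride n fuel (i + stride) out'
    else out

def windows_py (lines : List String) (win : Int) (stride : Int) : List (Int × Int) :=
  windowsLoopA lines win stride (lines.length : Int) (lines.length + 1) 0 []

-- ===== PORT B =====
-- nonblank = [k for k, t in enumerate(lines) if t.strip()]
def nonblankIdx (lines : List String) : List Int :=
  ((PySem.List.enumerate lines 0).filter (fun kt => pvNonBlank kt.2)).map (fun kt => kt.1)

-- B's inner while: advance the pointer past indices left behind by the window start
def advanceB (nb : List Int) (i : Int) : Nat → Nat → Nat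
  | 0, p => p
  | fuel + 1, p =>
    if h : p < nb.length then
      (if nb[p] < i then advanceB nb i fuel (p + 1) else p)
    else p

-- B's outer while-loop, carrying the pointer p (same fuel guard as A's port)
def windowsLoopB (nb : List Int) (win stride n : Int) :
    Nat → Int → Nat → List (Int × Int) → List (Int × Int)
  | 0, _, _, out => out
  | fuel + 1, i, p, out =>
    if i < n then
      let j := min n (i + win)
      let p' := advanceB nb i nb.length p
      let out' := if h : p' < nb.length then
                    (if nb[p'] < j then out ++ [(i, j)] else out)
                  else out
      if j = n then out' else windowsLoopB nb win stride n fuel (i + stride) p' out'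
    else out

def windows_py_alt (lines : List String) (win : Int) (stride : Int) : List (Int × Int) :=
  windowsLoopB (nonblankIdx lines) win stride (lines.length : Int) (lines.length + 1) 0 0 []

-- ===== PRECONDITION & SPEC =====
-- Pre_ excludes exactly the inputs on which A's while-loop never terminates
-- (non-positive stride with a window that never reaches the end of a non-empty list).
def Pre_windows_py (lines : List String) (win : Int) (stride : Int) : Prop :=
  lines = [] ∨ 1 ≤ stride ∨ (lines.length : Int) ≤ win
instance (lines : List String) (win : Int) (stride : Int) : Decidable (Pre_windows_py lines win stride) := by unfold Pre_windows_py; infer_instance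

def pvWitness_windows_py : List String × Int × Int := (["a", "", " b"], 2, 1)

-- When win < 0 and some visited window start i = m*stride (the largest such multiple is
-- floordiv (min k (-win-1)) stride * stride) puts a non-blank line k inside lines[i : n+i+win],
-- A's negative slice end wraps around and A emits a pair with a negative end index (e.g.
-- (0, -1)); B emits no window there, since a window of non-positive width is empty — the
-- intended reading of (start, end) pairs.
def D_windows_py (lines : List String) (win : Int) (stride : Int) : Prop :=
  win < 0 ∧ 1 ≤ stride ∧
    ∃ k < lines.length, pvNonBlank (lines.getD k "") = true ∧
      (k : Int) - (lines.length : Int) - win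
        < PySem.Int.floordiv (min (k : Int) (-win - 1)) stride * stride
instance (lines : List String) (win : Int) (stride : Int) : Decidable (D_windows_py lines win stride) := by unfold D_windows_py; infer_instance

def Spec_windows_py (lines : List String) (win : Int) (stride : Int) (out : List (Int × Int)) : Prop := ¬ D_windows_py lines win stride → out = windows_py_alt lines win stride
instance (lines : List String) (win : Int) (stride : Int) (out : List (Int × Int)) : Decidable (Spec_windows_py lines win stride out) := by unfold Spec_windows_py; infer_instance

def pvDiffWitness_windows_py : List String × Int × Int := (["x", "y"], -1, 1)
def pvDiffWitnessOut_windows_py : (List (Int × Int)) × (List (Int × Int)) := ([(0, -1)], [])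

-- ===== CLAIM (what is proved, stated in full; the proofs are below) =====
def Claim_unchanged_windows_py : Prop := ∀ (lines : List String) (win : Int) (stride : Int), Dom_windows_py lines win stride → Pre_windows_py lines win stride → Spec_windows_py lines win stride (windows_py lines win stride)
def Claim_exact_windows_py : Prop := ∀ (lines : List String) (win : Int) (stride : Int), Dom_windows_py lines win stride → Pre_windows_py lines win stride → D_windows_py lines win stride → windows_py lines win stride ≠ windows_py_alt lines win stride
def Claim_changed_windows_py : Prop := Dom_windows_py (pvDiffWitness_windows_py.1) (pvDiffWitness_windows_py.2.1) (pvDiffWitness_windows_py.2.2) ∧ Pre_windows_py (pvDiffWitness_windows_py.1) (pvDiffWitness_windows_py.2.1) (pvDiffWitness_windows_py.2.2) ∧ D_windows_py (pvDiffWitness_windows_py.1) (pvDiffWitness_windows_py.2.1) (pvDiffWitness_windows_py.2.2) ∧ windows_py (pvDiffWitness_windows_py.1) (pvDiffWitness_windows_py.2.1) (pvDiffWitness_windows_py.2.2) = pvDiffWitnessOut_windows_py.1 ∧ windows_py_alt (pvDiffWitness_windows_py.1) (pvDiffWitness_windows_py.2.1) (pvDiffWitness_windows_py.2.2) = pvDiffWitnessOut_windows_py.2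 ∧ pvDiffWitnessOut_windows_py.1 ≠ pvDiffWitnessOut_windows_py.2

-- ===== LEMMAS AND PROOFS =====

-- membership characterisation of the non-blank index list
theorem nb_mem (lines : List String) (x : Int) :
    x ∈ nonblankIdx lines ↔
      ∃ k : Nat, ∃ _ : k < lines.length, x = (k : Int) ∧ pvNonBlank lines[k] := by
  unfold nonblankIdx
  simp only [List.mem_map, List.mem_filter, PySem.List.mem_enumerate_iff]
  constructor
  · rintro ⟨⟨a, b⟩, ⟨⟨k, hk, hp⟩, hnb⟩, hx⟩
    obtain ⟨ha, hb⟩ := Prod.mk.injEq .. ▸ hp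
    exact ⟨k, hk, by simp_all⟩
  · rintro ⟨k, hk, hx, hnb⟩
    exact ⟨((k : Int), lines[k]), ⟨⟨k, hk, by simp⟩, hnb⟩, hx.symm⟩

theorem nb_sorted (lines : List String) : (nonblankIdx lines).Pairwise (· < ·) := by
  unfold nonblankIdx
  rw [List.pairwise_map]
  exact (PySem.List.pairwise_lt_enumerate lines 0).sublist (List.filter_sublist)

-- the pointer-advance loop never moves backwards and stops on an entry that is not < i
theorem advanceB_stop (nb : List Int) (i : Int) (fuel : Nat) : ∀ p : Nat,
    nb.length ≤ fuel + p →
    (p ≤ advanceB nb i fuel p ∧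
     (advanceB nb i fuel p < nb.length → ¬ nb.getD (advanceB nb i fuel p) 0 < i)) := by
  induction fuel with
  | zero =>
    intro p hfuel
    refine ⟨le_refl _, fun h => ?_⟩
    simp only [advanceB] at h ⊢
    omega
  | succ fuel ih =>
    intro p hfuel
    unfold advanceB
    by_cases hp : p < nb.length
    · rw [dif_pos hp]
      by_cases hlt : nb[p] < i
      · rw [if_pos hlt]
        obtain ⟨h1, h2⟩ := ih (p + 1) (by omega)
        exact ⟨by omega, h2⟩
      · rw [if_neg hlt]
        exact ⟨le_refl _, fun h => by rwa [List.getD_eq_getElem nb 0 h]⟩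
    · rw [dif_neg hp]
      exact ⟨le_refl _, fun h => absurd h hp⟩

-- and everything strictly before the stopping point is < i, given that everything
-- before the starting point already was
theorem advanceB_below (nb : List Int) (i : Int) (fuel : Nat) : ∀ p : Nat,
    (∀ q, q < p → q < nb.length → nb.getD q 0 < i) →
    (∀ q, q < advanceB nb i fuel p → q < nb.length → nb.getD q 0 < i) := by
  induction fuel with
  | zero => intro p hbelow; simpa [advanceB] using hbelow
  | succ fuel ih =>
    intro p hbelow
    unfold advanceB
    by_cases hp : p < nb.length
    · rw [dif_pos hp]
      by_cases hlt : nb[p] < i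
      · rw [if_pos hlt]
        apply ih
        intro q hq hql
        rcases Nat.lt_or_ge q p with h | h
        · exact hbelow q h hql
        · have : q = p := by omega
          subst this
          rwa [List.getD_eq_getElem nb 0 hql]
      · rw [if_neg hlt]; exact hbelow
    · rw [dif_neg hp]; exact hbelow

-- a slice with non-negative bounds holds a non-blank line iff some global index k
-- with i ≤ k < j (and k < n) is non-blank
theorem slice_any_iff (lines : List String) (i j : Int) (h0 : 0 ≤ i) (h0j : 0 ≤ j) :
    (PySem.List.slice lines (some i) (some j)).any pvNonBlank = true ↔
      ∃ k : Nat, ∃ _ : k < lines.length,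
        i ≤ (k : Int) ∧ (k : Int) < j ∧ pvNonBlank lines[k] := by
  rw [PySem.List.slice_toNat lines h0 h0j, List.any_eq_true]
  constructor
  · rintro ⟨x, hx, hnb⟩
    obtain ⟨m, hm, hget⟩ := List.mem_iff_getElem.mp hx
    have hml : i.toNat + m < lines.length := by
      simp only [List.length_take, List.length_drop] at hm; omega
    have hmj : m < j.toNat - i.toNat := by
      simp only [List.length_take, List.length_drop] at hm; omega
    refine ⟨i.toNat + m, hml, by omega, by omega, ?_⟩
    have : ((lines.drop i.toNat).take (j.toNat - i.toNat))[m] = lines[i.toNat + m] := by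
      simp [List.getElem_take, List.getElem_drop]
    rw [this] at hget
    rw [hget]; exact hnb
  · rintro ⟨k, hk, hik, hkj, hnb⟩
    refine ⟨lines[k], ?_, hnb⟩
    have hm : k - i.toNat < ((lines.drop i.toNat).take (j.toNat - i.toNat)).length := by
      simp only [List.length_take, List.length_drop]; omega
    apply List.mem_iff_getElem.mpr
    refine ⟨k - i.toNat, hm, ?_⟩
    have : ((lines.drop i.toNat).take (j.toNat - i.toNat))[k - i.toNat]'hm
        = lines[i.toNat + (k - i.toNat)]'(by simp only [List.length_take, List.length_drop] at hm; omega) := by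
      simp [List.getElem_take, List.getElem_drop]
    rw [this]
    congr 1
    omega

-- with the pointer stopped at p' (everything before it < i, its own entry ≥ i),
-- B's O(1) test coincides with "some non-blank index lies in [i, j)"
theorem pointer_test_iff (lines : List String) (i j : Int) (p' : Nat)
    (hbelow : ∀ q, q < p' → q < (nonblankIdx lines).length → (nonblankIdx lines).getD q 0 < i)
    (hstop : p' < (nonblankIdx lines).length → ¬ (nonblankIdx lines).getD p' 0 < i) :
    (p' < (nonblankIdx lines).length ∧ (nonblankIdx lines).getD p' 0 < j) ↔
      ∃ k : Nat, ∃ _ : k < lines.length,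
        i ≤ (k : Int) ∧ (k : Int) < j ∧ pvNonBlank lines[k] := by
  constructor
  · rintro ⟨hlen, hlt⟩
    have hmem : (nonblankIdx lines).getD p' 0 ∈ nonblankIdx lines := by
      rw [List.getD_eq_getElem _ 0 hlen]; exact List.getElem_mem hlen
    obtain ⟨k, hk, hxk, hknb⟩ := (nb_mem lines _).mp hmem
    exact ⟨k, hk, by rw [← hxk]; exact not_lt.mp (hstop hlen), by rw [← hxk]; exact hlt, hknb⟩
  · rintro ⟨k, hk, hik, hkj, hknb⟩
    have hmem : (k : Int) ∈ nonblankIdx lines := (nb_mem lines _).mpr ⟨k, hk, rfl, hknb⟩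
    obtain ⟨q, hq, hget⟩ := List.mem_iff_getElem.mp hmem
    have hqp : p' ≤ q := by
      by_contra hqp
      have := hbelow q (by omega) hq
      rw [List.getD_eq_getElem _ 0 hq, hget] at this
      omega
    refine ⟨by omega, ?_⟩
    rw [List.getD_eq_getElem _ 0 (by omega)]
    rcases Nat.lt_or_ge p' q with h | h
    · have := List.pairwise_iff_getElem.mp (nb_sorted lines) p' q (by omega) hq h
      rw [hget] at this
      omega
    · have : p' = q := by omega
      subst this
      rw [hget]; exact hkj

-- step-for-step agreement of the two loops when win ≥ 0
theorem loop_eq (lines : List String) (win stride : Int) (hw : 0 ≤ win)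
    (hpre : lines = [] ∨ 1 ≤ stride ∨ (lines.length : Int) ≤ win) :
    ∀ (fuel : Nat) (i : Int) (p : Nat) (out : List (Int × Int)), 0 ≤ i →
      (∀ q, q < p → q < (nonblankIdx lines).length → (nonblankIdx lines).getD q 0 < i) →
      windowsLoopA lines win stride (lines.length : Int) fuel i out
        = windowsLoopB (nonblankIdx lines) win stride (lines.length : Int) fuel i p out := by
  intro fuel
  induction fuel with
  | zero => intro i p out _ _; rfl
  | succ fuel ih =>
    intro i p out h0 hbelow
    unfold windowsLoopA windowsLoopB
    by_cases hlt : i < (lines.length : Int)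
    · rw [if_pos hlt, if_pos hlt]
      simp only []
      set j := min (lines.length : Int) (i + win) with hj
      have hj0 : 0 ≤ j := by rw [hj]; omega
      obtain ⟨hple, hstop'⟩ :=
        advanceB_stop (nonblankIdx lines) i (nonblankIdx lines).length p (by omega)
      have hbelow' := advanceB_below (nonblankIdx lines) i (nonblankIdx lines).length p hbelow
      set p' := advanceB (nonblankIdx lines) i (nonblankIdx lines).length p with hp'
      have htest := (slice_any_iff lines i j h0 hj0).trans
        (pointer_test_iff lines i j p' hbelow' hstop').symm
      have hout : (if (PySem.List.slice lines (some i) (some j)).any pvNonBlank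
                   then out ++ [(i, j)] else out)
          = (if h : p' < (nonblankIdx lines).length then
               (if (nonblankIdx lines)[p'] < j then out ++ [(i, j)] else out)
             else out) := by
        by_cases hc : (PySem.List.slice lines (some i) (some j)).any pvNonBlank
        · obtain ⟨h1, h2⟩ := htest.mp hc
          rw [if_pos hc, dif_pos h1, if_pos (by rwa [List.getD_eq_getElem _ 0 h1] at h2)]
        · rw [if_neg hc]
          by_cases h1 : p' < (nonblankIdx lines).length
          · rw [dif_pos h1]
            by_cases h2 : (nonblankIdx lines)[p'] < j
            · exact absurd (htest.mpr ⟨h1, by rwa [List.getD_eq_getElem _ 0 h1]⟩) hc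
            · rw [if_neg h2]
          · rw [dif_neg h1]
      rw [hout]
      by_cases hbr : j = (lines.length : Int)
      · rw [if_pos hbr, if_pos hbr]
      · rw [if_neg hbr, if_neg hbr]
        have hs : 1 ≤ stride := by
          rcases hpre with h | h | h
          · exfalso; subst h; simp at hlt; omega
          · exact h
          · exfalso; apply hbr; rw [hj]; omega
        apply ih
        · omega
        · intro q hq hql
          have := hbelow' q hq hql
          omega
    · rw [if_neg hlt, if_neg hlt]

-- when win < 0 B emits nothing: after the advance the pointer's entry is ≥ i > j
theorem loopB_neg (lines : List String) (win stride : Int) (hw : win < 0) :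
    ∀ (fuel : Nat) (i : Int) (p : Nat) (out : List (Int × Int)),
      windowsLoopB (nonblankIdx lines) win stride (lines.length : Int) fuel i p out = out := by
  intro fuel
  induction fuel with
  | zero => intro i p out; rfl
  | succ fuel ih =>
    intro i p out
    unfold windowsLoopB
    by_cases hlt : i < (lines.length : Int)
    · rw [if_pos hlt]
      simp only []
      set j := min (lines.length : Int) (i + win) with hj
      obtain ⟨hple, hstop'⟩ :=
        advanceB_stop (nonblankIdx lines) i (nonblankIdx lines).length p (by omega)
      set p' := advanceB (nonblankIdx lines) i (nonblankIdx lines).length p with hp'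
      have hout : (if h : p' < (nonblankIdx lines).length then
               (if (nonblankIdx lines)[p'] < j then out ++ [(i, j)] else out)
             else out) = out := by
        by_cases h1 : p' < (nonblankIdx lines).length
        · rw [dif_pos h1]
          have := hstop' h1
          rw [List.getD_eq_getElem _ 0 h1] at this
          rw [if_neg (by rw [hj]; omega)]
        · rw [dif_neg h1]
      rw [hout]
      rw [if_neg (by rw [hj]; omega)]
      exact ih _ _ _
    · rw [if_neg hlt]

-- a slice whose stop index is negative equals the slice stopped at the wrapped position
theorem slice_stop_shift (lines : List String) (i b : Int) (hb : b < 0) :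
    PySem.List.slice lines (some i) (some b)
      = PySem.List.slice lines (some i) (some (max 0 ((lines.length : Int) + b))) := by
  have hrfl : ∀ c : Int, PySem.List.slice lines (some i) (some c)
      = (lines.drop (PySem.List.clampIdx lines.length i)).take
          (PySem.List.clampIdx lines.length c - PySem.List.clampIdx lines.length i) :=
    fun _ => rfl
  have hclamp : PySem.List.clampIdx lines.length b
      = PySem.List.clampIdx lines.length (max 0 ((lines.length : Int) + b)) := by
    unfold PySem.List.clampIdx
    split_ifs <;> omega

  rw [hrfl, hrfl, hclamp]

-- when win < 0 and no visited window can witness D_, A emits nothing either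
theorem loopA_neg (lines : List String) (win stride : Int) (hw : win < 0) (hs : 1 ≤ stride)
    (hnd : ¬ D_windows_py lines win stride) :
    ∀ (fuel : Nat) (m : Nat) (out : List (Int × Int)),
      windowsLoopA lines win stride (lines.length : Int) fuel ((m : Int) * stride) out = out := by
  intro fuel
  induction fuel with
  | zero => intro m out; rfl
  | succ fuel ih =>
    intro m out
    unfold windowsLoopA
    by_cases hlt : (m : Int) * stride < (lines.length : Int)
    · rw [if_pos hlt]
      simp only []
      set i := (m : Int) * stride with hi
      set j := min (lines.length : Int) (i + win) with hj
      have h0 : 0 ≤ i := by positivity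
      have hmn : m < lines.length := by
        have h1 : (m : Int) ≤ i := by rw [hi]; nlinarith
        omega
      have hcond : (PySem.List.slice lines (some i) (some j)).any pvNonBlank = false := by
        by_contra hc
        rw [Bool.not_eq_false] at hc
        rcases (by omega : 0 ≤ i + win ∨ i + win < 0) with hiw | hiw
        · -- j ≤ i + win < i: the slice is empty
          have hj0 : 0 ≤ j := by rw [hj]; omega
          obtain ⟨k, hk, hik, hkj, _⟩ := (slice_any_iff lines i j h0 hj0).mp hc
          rw [hj] at hkj
          omega
        · -- j = i + win < 0: the slice covers [i, n+i+win); that is a D_ witness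
          have hjv : j = i + win := by rw [hj]; omega
          rcases (by omega : 0 ≤ (lines.length : Int) + i + win ∨ (lines.length : Int) + i + win < 0) with hni | hni
          · -- lines[i:j] with j < 0 equals lines[i : n+i+win]
            have hsl : PySem.List.slice lines (some i) (some j)
                = PySem.List.slice lines (some i) (some ((lines.length : Int) + i + win)) := by
              rw [hjv, slice_stop_shift lines i (i + win) (by omega)]
              have hmx : max 0 ((lines.length : Int) + (i + win))
                  = (lines.length : Int) + i + win := by omega
              rw [hmx]
            rw [hsl] at hc
            obtain ⟨k, hk, hik, hkj, hknb⟩ :=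
              (slice_any_iff lines i ((lines.length : Int) + i + win) h0 hni).mp hc
            apply hnd
            refine ⟨hw, hs, k, hk, by rwa [List.getD_eq_getElem lines "" hk], ?_⟩
            -- i = m*stride is a stride-multiple ≤ min k (-win-1), hence ≤ the largest one
            have h1 : (m : Int) * stride ≤ min (k : Int) (-win - 1) := by omega
            have h2 : (m : Int) ≤ PySem.Int.floordiv (min (k : Int) (-win - 1)) stride :=
              (PySem.Int.le_floordiv_iff_mul_le (by omega)).mpr h1
            have h3 : (m : Int) * stride
                ≤ PySem.Int.floordiv (min (k : Int) (-win - 1)) stride * stride :=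
              mul_le_mul_of_nonneg_right h2 (by omega)
            linarith
          · -- the window has fallen off the left edge entirely: the slice is empty
            have hB : PySem.List.clampIdx lines.length j = 0 := by
              unfold PySem.List.clampIdx; split_ifs <;> omega
            have hlen0 : (PySem.List.slice lines (some i) (some j)).length = 0 := by
              rw [PySem.List.length_slice, hB]; omega
            rw [List.eq_nil_of_length_eq_zero hlen0] at hc
            simp at hc
      rw [hcond]
      simp only [Bool.false_eq_true, if_false]
      have hbr : ¬ j = (lines.length : Int) := by rw [hj]; omega
      rw [if_neg hbr]
      have : i + stride = ((m + 1 : Nat) : Int) * stride := by push_cast; rw [hi]; ring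
      rw [this]
      exact ih (m + 1) out
    · rw [if_neg hlt]

-- A's loop only ever appends to its accumulator
theorem loopA_extend (lines : List String) (win stride n' : Int) :
    ∀ (fuel : Nat) (i : Int) (out : List (Int × Int)),
      ∃ t, windowsLoopA lines win stride n' fuel i out = out ++ t := by
  intro fuel
  induction fuel with
  | zero => intro i out; exact ⟨[], by simp [windowsLoopA]⟩
  | succ fuel ih =>
    intro i out
    unfold windowsLoopA
    by_cases hlt : i < n'
    · rw [if_pos hlt]
      simp only []
      set j := min n' (i + win) with hj
      by_cases hc : (PySem.List.slice lines (some i) (some j)).any pvNonBlank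
      · rw [if_pos hc]
        by_cases hbr : j = n'
        · rw [if_pos hbr]; exact ⟨[(i, j)], rfl⟩
        · rw [if_neg hbr]
          obtain ⟨t, ht⟩ := ih (i + stride) (out ++ [(i, j)])
          exact ⟨[(i, j)] ++ t, by rw [ht, List.append_assoc]⟩
      · rw [if_neg hc]
        by_cases hbr : j = n'
        · rw [if_pos hbr]; exact ⟨[], by simp⟩
        · rw [if_neg hbr]; exact ih (i + stride) out
    · rw [if_neg hlt]; exact ⟨[], by simp⟩

-- if the window at start m'*stride (still inside the list) holds a non-blank line,
-- A's loop, launched at start m*stride with m ≤ m' and enough fuel, returns a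
-- non-empty list
theorem loopA_emits (lines : List String) (win stride : Int) (hw : win < 0) (hs : 1 ≤ stride)
    (m' : Nat) (hilt : (m' : Int) * stride < (lines.length : Int))
    (htest : (PySem.List.slice lines (some ((m' : Int) * stride))
        (some (min (lines.length : Int) ((m' : Int) * stride + win)))).any pvNonBlank = true) :
    ∀ (fuel : Nat) (m : Nat) (out : List (Int × Int)), m ≤ m' → m' - m < fuel →
      windowsLoopA lines win stride (lines.length : Int) fuel ((m : Int) * stride) out ≠ [] := by
  intro fuel
  induction fuel with
  | zero => intro m out _ hfm; omega
  | succ fuel ih =>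
    intro m out hmm' hfm
    unfold windowsLoopA
    have hmono : (m : Int) * stride ≤ (m' : Int) * stride :=
      mul_le_mul_of_nonneg_right (by exact_mod_cast hmm') (by omega)
    rw [if_pos (by omega)]
    simp only []
    set i := (m : Int) * stride with hi
    set j := min (lines.length : Int) (i + win) with hj
    have hbr : ¬ j = (lines.length : Int) := by rw [hj]; omega
    by_cases hme : m = m'
    · subst hme
      have hc : (PySem.List.slice lines (some i) (some j)).any pvNonBlank = true := by
        rw [hj, hi]; exact htest
      rw [if_pos hc, if_neg hbr]
      obtain ⟨t, ht⟩ := loopA_extend lines win stride (lines.length : Int) fuel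
        (i + stride) (out ++ [(i, j)])
      rw [ht]
      simp
    · rw [if_neg hbr]
      have hstep : i + stride = ((m + 1 : Nat) : Int) * stride := by push_cast; rw [hi]; ring
      have hnext : ∀ out' : List (Int × Int),
          windowsLoopA lines win stride (lines.length : Int) fuel (i + stride) out' ≠ [] := by
        intro out'
        rw [hstep]
        exact ih (m + 1) out' (by omega) (by omega)
      by_cases hc : (PySem.List.slice lines (some i) (some j)).any pvNonBlank
      · rw [if_pos hc]; exact hnext _
      · rw [if_neg hc]; exact hnext _

-- ===== VERDICT (by name: the statement is the Claim_ definition above) =====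
theorem windows_py_spec : Claim_unchanged_windows_py := by
  intro lines win stride _ hpre
  unfold Spec_windows_py windows_py windows_py_alt
  intro hnd
  rcases (by omega : 0 ≤ win ∨ win < 0) with hw | hw
  · exact loop_eq lines win stride hw hpre (lines.length + 1) 0 0 []
      le_rfl (by intro q hq _; omega)
  · rw [loopB_neg lines win stride hw]
    rcases hpre with h | h | h
    · subst h
      simp [windowsLoopA]
    · have h0 : (0 : Int) = ((0 : Nat) : Int) * stride := by simp
      rw [h0]
      exact loopA_neg lines win stride hw h hnd (lines.length + 1) 0 []
    · exfalso
      have : (0 : Int) ≤ (lines.length : Int) := by positivity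
      omega

theorem windows_py_changed : Claim_changed_windows_py := by
  unfold Claim_changed_windows_py; decide

theorem windows_py_tight : Claim_exact_windows_py := by
  intro lines win stride _ _ hd
  obtain ⟨hw, hs, k, hk, hnb, hineq⟩ := hd
  unfold windows_py windows_py_alt
  rw [loopB_neg lines win stride hw]
  have hq0 : (0 : Int) ≤ PySem.Int.floordiv (min (k : Int) (-win - 1)) stride :=
    (PySem.Int.le_floordiv_iff_mul_le (by omega)).mpr (by omega)
  have hqs : PySem.Int.floordiv (min (k : Int) (-win - 1)) stride * stride
      ≤ min (k : Int) (-win - 1) :=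
    (PySem.Int.le_floordiv_iff_mul_le (by omega)).mp (le_refl _)
  have hqm : ((PySem.Int.floordiv (min (k : Int) (-win - 1)) stride).toNat : Int)
      = PySem.Int.floordiv (min (k : Int) (-win - 1)) stride := Int.toNat_of_nonneg hq0
  set m' := (PySem.Int.floordiv (min (k : Int) (-win - 1)) stride).toNat with hm'
  have hms : (m' : Int) * stride
      = PySem.Int.floordiv (min (k : Int) (-win - 1)) stride * stride := by rw [hqm]
  have hYs : (m' : Int) * stride ≤ min (k : Int) (-win - 1) := hms ▸ hqs
  have hYi : (k : Int) - (lines.length : Int) - win < (m' : Int) * stride := by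
    rw [hms]; exact hineq
  have hilt : (m' : Int) * stride < (lines.length : Int) := by omega
  have htest : (PySem.List.slice lines (some ((m' : Int) * stride))
      (some (min (lines.length : Int) ((m' : Int) * stride + win)))).any pvNonBlank = true := by
    have hjv : min (lines.length : Int) ((m' : Int) * stride + win)
        = (m' : Int) * stride + win := by omega
    rw [hjv, slice_stop_shift lines _ _ (by omega)]
    have hmax : max 0 ((lines.length : Int) + ((m' : Int) * stride + win))
        = (lines.length : Int) + (m' : Int) * stride + win := by omega
    rw [hmax]
    apply (slice_any_iff lines ((m' : Int) * stride)
      ((lines.length : Int) + (m' : Int) * stride + win) (by positivity)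
      (by omega)).mpr
    refine ⟨k, hk, by omega, by omega, ?_⟩
    rwa [List.getD_eq_getElem lines "" hk] at hnb
  have hm'len : m' - 0 < lines.length + 1 := by
    have h1 : (m' : Int) ≤ (m' : Int) * stride :=
      le_mul_of_one_le_right (by positivity) hs
    omega
  have h00 : (0 : Int) = ((0 : Nat) : Int) * stride := by simp
  rw [h00]
  exact loopA_emits lines win stride hw hs m' hilt htest (lines.length + 1) 0 []
    (Nat.zero_le _) hm'len
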